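-- pv_equiv track=rewrite | github.com/opensource-nepal/py-nepali | nepali/number/utils.py | add_comma
-- ===== SOURCE A (Python) =====
-- from typing import Any
--
-- NP_NUMBERS = ["०", "१", "२", "३", "४", "५", "६", "७", "८", "९"]
--
-- def english_to_nepali(number: Any) -> str:
--     """
--     Converts english number to nepali.
--     """
--     number = str(number)
--     converted_number = []
--     for n in number:
--         num = ord(n) - ord("0")
--         if num in range(0, 10):
--             converted_number.append(NP_NUMBERS[num])
--         else:
--             converted_number.append(n)
--     return "".join(converted_number)
--
-- def add_comma(number: Any, convert=False) -> str:
--     """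
--     Adds comma in nepali style
--     Eg. 123456789 => 12,34,56,789
--
--     :param number Any: Number to be converted
--     :param convert bool: If true converts english number to nepali
--     """
--     if convert:
--         number = english_to_nepali(number)
--     else:
--         number = str(number)
--
--     number_with_comma = []
--     counter = 0
--     for nepali_number_char in list(str(number))[::-1]:
--         if counter == 3 or (counter != 1 and (counter - 1) % 2 == 0):
--             number_with_comma.append(",")
--         number_with_comma.append(nepali_number_char)
--         counter += 1
--
--     return "".join(number_with_comma[::-1])
-- ===== SOURCE B (Python) =====
-- NP_NUMBERS = ["०", "१", "२", "३", "४", "५", "६", "७", "८", "९"]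
--
-- def add_comma(number, convert=False):
--     s = str(number)
--     if convert:
--         s = "".join(NP_NUMBERS[ord(c) - 48] if "0" <= c <= "9" else c for c in s)
--     n = len(s)
--     if n <= 3:
--         return s
--     groups = [s[-3:]]
--     i = n - 3
--     while i > 0:
--         groups.append(s[max(0, i - 2):i])
--         i -= 2
--     return ",".join(reversed(groups))
-- ===== Notes on version B (the rewrite author's own statement) =====
-- stated objective: alternative
-- what changed: B slices the string into groups directly (last three chars, then two chars at a time walking a cursor leftward) and comma-joins them, instead of A's reversed per-character loop that decides each comma from a counter parity test and re-reverses the result.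
import Mathlib
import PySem

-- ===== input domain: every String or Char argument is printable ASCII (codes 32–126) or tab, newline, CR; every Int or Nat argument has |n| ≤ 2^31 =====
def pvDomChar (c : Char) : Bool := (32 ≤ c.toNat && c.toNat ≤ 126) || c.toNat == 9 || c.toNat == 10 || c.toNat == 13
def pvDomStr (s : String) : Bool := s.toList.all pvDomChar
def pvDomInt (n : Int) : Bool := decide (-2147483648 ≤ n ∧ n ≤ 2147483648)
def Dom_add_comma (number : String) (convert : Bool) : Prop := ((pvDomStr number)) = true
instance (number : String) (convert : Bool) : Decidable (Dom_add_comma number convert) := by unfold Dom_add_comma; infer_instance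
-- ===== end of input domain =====

-- B groups the string by slicing (last 3 chars, then 2 at a time leftward) instead of A's
-- reversed per-character counter loop; objective: alternative decomposition, same cost.

-- ===== PORT A =====
def np_numbers : List Char := ['०', '१', '२', '३', '४', '५', '६', '७', '८', '९']

def english_to_nepali (number : String) : String :=
  String.ofList
    (number.toList.foldl
      (fun acc n =>
        let num : Int := (n.toNat : Int) - ('0'.toNat : Int)
        if 0 ≤ num ∧ num < 10 then acc ++ [np_numbers.getD num.toNat n]
        else acc ++ [n])
      [])

-- the body of A's for-loop: maybe-append ',', append the char, counter += 1
def stepA (st : List Char × Int) (c : Char) : List Char × Int :=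
  let acc :=
    if st.2 = 3 ∨ (st.2 ≠ 1 ∧ PySem.Int.mod (st.2 - 1) 2 = 0) then st.1 ++ [',']
    else st.1
  (acc ++ [c], st.2 + 1)

def add_comma (number : String) (convert : Bool) : String :=
  let number := if convert then english_to_nepali number else number
  let res := (number.toList.reverse.foldl stepA ([], 0)).1
  String.ofList res.reverse

-- ===== PORT B =====
def bConvertChar (c : Char) : Char :=
  if '0' ≤ c ∧ c ≤ '9' then np_numbers.getD (c.toNat - 48) c else c

def bGroups (l : List Char) (i : Nat) : List (List Char) :=
  if i = 0 then [] else ((l.take i).drop (i - 2)) :: bGroups l (i - 2)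
termination_by i
decreasing_by omega

def add_comma_alt (number : String) (convert : Bool) : String :=
  let s := if convert then String.ofList (number.toList.map bConvertChar) else number
  let l := s.toList
  let n := l.length
  if n ≤ 3 then s
  else String.ofList (List.intercalate [','] ((l.drop (n - 3) :: bGroups l (n - 3)).reverse))

-- ===== PRECONDITION & SPEC =====
def Spec_add_comma (number : String) (convert : Bool) (out : String) : Prop := out = add_comma_alt number convert
instance (number : String) (convert : Bool) (out : String) : Decidable (Spec_add_comma number convert out) := by unfold Spec_add_comma; infer_instance

-- ===== CLAIM (what is proved, stated in full; the proofs are below) =====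
def Claim_equal_add_comma : Prop := ∀ (number : String) (convert : Bool), Dom_add_comma number convert → Spec_add_comma number convert (add_comma number convert)

-- ===== LEMMAS AND PROOFS =====

-- reversed-string shape of A's output: first 3 chars plain, then ',' before every 2nd char
def H2 : List Char → List Char
  | [] => []
  | [a] => [',', a]
  | a :: b :: t => ',' :: a :: b :: H2 t

def emit : List Char → Nat → List Char
  | [], _ => []
  | c :: t, k => (if 3 ≤ k ∧ k % 2 = 1 then [','] else []) ++ c :: emit t (k + 1)

theorem condA (k : Nat) :
    ((k : Int) = 3 ∨ ((k : Int) ≠ 1 ∧ PySem.Int.mod ((k : Int) - 1) 2 = 0)) ↔ (3 ≤ k ∧ k % 2 = 1) := by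
  rw [PySem.Int.mod_eq_zero_iff_dvd]
  constructor <;> intro h
  · rcases h with h | ⟨h1, h2⟩ <;> omega
  · right; omega

theorem foldA (r : List Char) : ∀ (acc : List Char) (k : Nat),
    ((r.foldl stepA (acc, ((k : Nat) : Int))).1) = acc ++ emit r k := by
  induction r with
  | nil => intro acc k; simp [emit]
  | cons c t ih =>
    intro acc k
    have hk : ((k : Int) + 1) = ((k + 1 : Nat) : Int) := by push_cast; ring
    by_cases h : (3 ≤ k ∧ k % 2 = 1)
    · simp only [List.foldl_cons, stepA, emit, if_pos h, if_pos ((condA k).mpr h), hk, ih]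
      simp
    · simp only [List.foldl_cons, stepA, emit, if_neg h, if_neg (fun hc => h ((condA k).mp hc)), hk, ih]
      simp

theorem emit_odd (t : List Char) : ∀ (k : Nat), 3 ≤ k → k % 2 = 1 → emit t k = H2 t := by
  induction t using H2.induct with
  | case1 => intro k _ _; rfl
  | case2 a => intro k h1 h2; simp [emit, H2, if_pos (And.intro h1 h2)]
  | case3 a b t ih =>
    intro k h1 h2
    have hb : ¬ (3 ≤ k + 1 ∧ (k + 1) % 2 = 1) := by omega
    rw [emit, if_pos (And.intro h1 h2), emit, if_neg hb,
        show k + 1 + 1 = k + 2 from rfl, ih (k + 2) (by omega) (by omega), H2]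
    rfl

theorem emit_zero (r : List Char) : emit r 0 = r.take 3 ++ H2 (r.drop 3) := by
  match r with
  | [] => rfl
  | [a] => rfl
  | [a, b] => rfl
  | a :: b :: c :: t => simp [emit, emit_odd t 3 (by omega) (by omega)]

theorem inter_app (xs : List (List Char)) (g : List Char) (h : xs ≠ []) :
    List.intercalate [','] (xs ++ [g]) = List.intercalate [','] xs ++ ',' :: g := by
  induction xs with
  | nil => exact absurd rfl h
  | cons x t ih =>
    cases t with
    | nil => simp [List.intercalate, List.intersperse]
    | cons y u =>
      have step : ∀ (a b : List Char) (v : List (List Char)),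
          List.intercalate [','] (a :: b :: v) = a ++ [','] ++ List.intercalate [','] (b :: v) := by
        intro a b v; simp [List.intercalate, List.intersperse]
      cases u with
      | nil => simp [List.intercalate, List.intersperse]
      | cons z w =>
        rw [show (x :: y :: z :: w) ++ [g] = x :: y :: (z :: w ++ [g]) from rfl, step,
            show y :: (z :: w ++ [g]) = (y :: z :: w) ++ [g] from rfl, ih (by simp)]
        simp [step x y (z :: w), step y z w]

theorem bGroups_ne_nil (l : List Char) (i : Nat) (h : 1 ≤ i) : bGroups l i ≠ [] := by
  rw [bGroups]; simp [Nat.ne_of_gt h]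

theorem keyB (l : List Char) (i : Nat) : 1 ≤ i → i ≤ l.length →
    (H2 (l.take i).reverse).reverse = List.intercalate [','] (bGroups l i).reverse ++ [','] := by
  induction i using Nat.strong_induction_on with
  | _ i ih =>
    match i with
    | 0 => intro h1 _; omega
    | 1 =>
      intro _ h2
      obtain ⟨a, t, rfl⟩ : ∃ a t, l = a :: t := by
        cases l with
        | nil => simp at h2
        | cons a t => exact ⟨a, t, rfl⟩
      rw [bGroups]
      simp [H2, bGroups, List.intercalate]
    | 2 =>
      intro _ h2
      obtain ⟨a, b, t, rfl⟩ : ∃ a b t, l = a :: b :: t := by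
        cases l with
        | nil => simp at h2
        | cons a t =>
          cases t with
          | nil => simp at h2
          | cons b u => exact ⟨a, b, u, rfl⟩
      rw [bGroups]
      simp [H2, bGroups, List.intercalate]
    | (m + 3) =>
      intro _ h2
      have htake : l.take (m + 3) = l.take (m + 1) ++ (l.drop (m + 1)).take 2 := by
        rw [show m + 3 = (m + 1) + 2 from rfl, List.take_add]
      have hgrp : (l.take (m + 3)).drop (m + 1) = (l.drop (m + 1)).take 2 := by
        rw [List.drop_take, show m + 3 - (m + 1) = 2 from by omega]
      have hlen2 : ((l.drop (m + 1)).take 2).length = 2 := by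
        simp; omega
      obtain ⟨x, y, hxy⟩ : ∃ x y, (l.drop (m + 1)).take 2 = [x, y] := by
        match hg : (l.drop (m + 1)).take 2, hlen2 with
        | [x, y], _ => exact ⟨x, y, rfl⟩
      have hrev : (l.take (m + 3)).reverse = y :: x :: (l.take (m + 1)).reverse := by
        rw [htake, hxy]; simp
      have hih := ih (m + 1) (by omega) (by omega) (by omega)
      have hne : bGroups l (m + 1) ≠ [] := bGroups_ne_nil l (m + 1) (by omega)
      rw [hrev, H2, bGroups, if_neg (show ¬ m + 3 = 0 by omega),
          show m + 3 - 2 = m + 1 from rfl]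
      simp only [List.reverse_cons]
      rw [inter_app _ _ (by simpa using hne)]
      simp [hih, hgrp, hxy]

theorem char_conv (c : Char) :
    (if 0 ≤ (c.toNat : Int) - ('0'.toNat : Int) ∧ (c.toNat : Int) - ('0'.toNat : Int) < 10
     then np_numbers.getD ((c.toNat : Int) - ('0'.toNat : Int)).toNat c
     else c) = bConvertChar c := by
  have h0 : '0'.toNat = 48 := rfl
  have hle : ('0' ≤ c ∧ c ≤ '9') ↔ (48 ≤ c.toNat ∧ c.toNat ≤ 57) := by
    simp [Char.le_def, UInt32.le_iff_toNat_le]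
  unfold bConvertChar
  rw [h0]
  by_cases h : 48 ≤ c.toNat ∧ c.toNat ≤ 57
  · rw [if_pos (by push_cast; omega), if_pos (hle.mpr h)]
    congr 1
    omega
  · rw [if_neg (by push_cast; omega), if_neg (fun hc => h (hle.mp hc))]

theorem convert_eq (number : String) :
    (english_to_nepali number).toList = number.toList.map bConvertChar := by
  unfold english_to_nepali
  rw [String.toList_ofList]
  rw [show (fun (acc : List Char) n =>
        let num : Int := (n.toNat : Int) - ('0'.toNat : Int)
        if 0 ≤ num ∧ num < 10 then acc ++ [np_numbers.getD num.toNat n]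
        else acc ++ [n]) = (fun acc n => acc ++ [bConvertChar n]) from ?_]
  · simpa using PySem.List.foldl_append_singleton_eq_map (f := bConvertChar) (l := number.toList) []
  · funext acc c
    show (if _ then acc ++ [np_numbers.getD _ c] else acc ++ [c]) = acc ++ [bConvertChar c]
    rw [← char_conv c]
    split <;> rfl

-- A's whole output over the converted character list
theorem a_core (l : List Char) :
    ((l.reverse.foldl stepA ([], 0)).1).reverse
    = (H2 (l.take (l.length - 3)).reverse).reverse ++ l.drop (l.length - 3) := by
  have h := foldA l.reverse [] 0
  simp only [Nat.cast_zero, List.nil_append] at h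
  rw [h, emit_zero, List.take_reverse, List.drop_reverse]
  simp

theorem core_eq (l : List Char) :
    (H2 (l.take (l.length - 3)).reverse).reverse ++ l.drop (l.length - 3)
      = if l.length ≤ 3 then l
        else List.intercalate [','] ((l.drop (l.length - 3) :: bGroups l (l.length - 3)).reverse) := by
  by_cases h : l.length ≤ 3
  · rw [if_pos h]
    have : l.length - 3 = 0 := by omega
    simp [this, H2]
  · rw [if_neg h]
    have h1 : 1 ≤ l.length - 3 := by omega
    rw [keyB l (l.length - 3) h1 (by omega)]
    rw [List.reverse_cons, inter_app _ _ (by simpa using bGroups_ne_nil l _ h1)]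
    simp

-- both ports after the (shared) conversion step, as a statement about one string
theorem main_eq (s : String) :
    String.ofList ((s.toList.reverse.foldl stepA ([], 0)).1.reverse)
      = if s.toList.length ≤ 3 then s
        else String.ofList (List.intercalate [','] ((s.toList.drop (s.toList.length - 3) :: bGroups s.toList (s.toList.length - 3)).reverse)) := by
  rw [a_core, core_eq, apply_ite String.ofList, String.ofList_toList]

-- ===== VERDICT (by name: the statement is the Claim_ definition above) =====
theorem add_comma_spec : Claim_equal_add_comma := by
  intro number convert _
  show add_comma number convert = add_comma_alt number convert
  cases convert with
  | false => exact main_eq number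
  | true =>
    have h : english_to_nepali number = String.ofList (number.toList.map bConvertChar) := by
      rw [← String.ofList_toList (s := english_to_nepali number), convert_eq]
    have hm := main_eq (String.ofList (number.toList.map bConvertChar))
    unfold add_comma add_comma_alt
    simp only [reduceIte, h]
    exact hm
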